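-- pv_equiv track=rewrite | github.com/Aliffikri78/telegram-report | app/telegram_bot.py | parse_cmd_site_when
-- ===== SOURCE A (Python) =====
-- from typing import Optional, Dict
--
-- SITES: Dict[str, Dict[str,bool]] = {
--     'ALPHA':   {'alpha': True, 'a': True},
--     'BRAVO':   {'bravo': True, 'b': True},
--     'CHARLIE': {'charlie': True, 'c': True},
--     'DELTA':   {'delta': True, 'd': True},
--     'ECHO':    {'echo': True,  'e': True},
-- }
--
-- BEFORE_WORDS = {'sebelum','sblm','sblum','sebelom','before'}
--
-- AFTER_WORDS  = {'selepas','slps','slpas','after','lepas'}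
--
-- def all_aliases() -> Dict[str,str]:
--     out={}
--     for site, aliases in SITES.items():
--         for alias in aliases:
--             out[alias.lower()]=site
--     return out
--
-- def normalize_when(word: Optional[str]) -> Optional[str]:
--     if not word: return None
--     w = word.lower()
--     if w in BEFORE_WORDS: return 'before'
--     if w in AFTER_WORDS:  return 'after'
--     return None
--
-- def parse_cmd_site_when(args):
--     site=None; when=None
--     aliases = all_aliases()
--     for tok in args:
--         low=tok.lower()
--         if not site and low in aliases:
--             site = aliases[low]; continue
--         w = normalize_when(low)
--         if not when and w: when = w
--     return site, when
-- ===== SOURCE B (Python) =====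
-- from typing import Optional, Dict
--
-- SITES: Dict[str, Dict[str,bool]] = {
--     'ALPHA':   {'alpha': True, 'a': True},
--     'BRAVO':   {'bravo': True, 'b': True},
--     'CHARLIE': {'charlie': True, 'c': True},
--     'DELTA':   {'delta': True, 'd': True},
--     'ECHO':    {'echo': True,  'e': True},
-- }
--
-- BEFORE_WORDS = {'sebelum','sblm','sblum','sebelom','before'}
--
-- AFTER_WORDS  = {'selepas','slps','slpas','after','lepas'}
--
-- # Flat, precomputed lookup tables replacing the built-at-call-time nested
-- # alias dict and the two-set normalizer.
-- ALIAS_TO_SITE = {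
--     'alpha': 'ALPHA', 'a': 'ALPHA',
--     'bravo': 'BRAVO', 'b': 'BRAVO',
--     'charlie': 'CHARLIE', 'c': 'CHARLIE',
--     'delta': 'DELTA', 'd': 'DELTA',
--     'echo': 'ECHO', 'e': 'ECHO',
-- }
--
-- WHEN_OF = {
--     'sebelum': 'before', 'sblm': 'before', 'sblum': 'before',
--     'sebelom': 'before', 'before': 'before',
--     'selepas': 'after', 'slps': 'after', 'slpas': 'after',
--     'after': 'after', 'lepas': 'after',
-- }
--
-- def parse_cmd_site_when(args):
--     # Two independent first-match table lookups over the lowered tokens.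
--     # Alias words and when-words are disjoint, so this matches the single
--     # stateful loop of the original exactly.
--     lows = [t.lower() for t in args]
--     site = next((ALIAS_TO_SITE[w] for w in lows if w in ALIAS_TO_SITE), None)
--     when = next((WHEN_OF[w] for w in lows if w in WHEN_OF), None)
--     return site, when
-- ===== Notes on version B (the rewrite author's own statement) =====
-- stated objective: simpler
-- what changed: Replaces the single stateful loop (which builds the alias dict from nested SITES at every call and normalizes when-words through two sets) with two precomputed flat lookup tables and two independent first-match scans over the lowered tokens.
import Mathlib
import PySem

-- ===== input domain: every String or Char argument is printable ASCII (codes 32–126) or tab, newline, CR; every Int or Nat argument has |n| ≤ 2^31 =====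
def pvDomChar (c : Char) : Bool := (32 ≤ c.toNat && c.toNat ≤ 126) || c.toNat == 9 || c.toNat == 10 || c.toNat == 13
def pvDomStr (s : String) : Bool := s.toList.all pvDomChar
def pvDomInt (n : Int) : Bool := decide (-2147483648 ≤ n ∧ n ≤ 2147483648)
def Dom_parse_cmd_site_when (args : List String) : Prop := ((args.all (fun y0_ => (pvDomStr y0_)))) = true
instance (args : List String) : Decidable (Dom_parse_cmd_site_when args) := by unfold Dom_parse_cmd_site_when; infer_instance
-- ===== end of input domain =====

-- ===== PORT A =====
-- B replaces the stateful loop over (site, when) — with its call-time alias-dict build and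
-- two-set when-normalizer — by two precomputed flat lookup tables and two independent
-- first-match scans (simpler decomposition); return-value equivalence only (no mutation).
def pvSITES : PySem.Dict String (PySem.Dict String Bool) := PySem.Dict.ofList
  [ ("ALPHA",   PySem.Dict.ofList [("alpha", true), ("a", true)]),
    ("BRAVO",   PySem.Dict.ofList [("bravo", true), ("b", true)]),
    ("CHARLIE", PySem.Dict.ofList [("charlie", true), ("c", true)]),
    ("DELTA",   PySem.Dict.ofList [("delta", true), ("d", true)]),
    ("ECHO",    PySem.Dict.ofList [("echo", true), ("e", true)]) ]

def BEFORE_WORDS : PySem.Set String :=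
  PySem.Set.ofList ["sebelum", "sblm", "sblum", "sebelom", "before"]

def AFTER_WORDS : PySem.Set String :=
  PySem.Set.ofList ["selepas", "slps", "slpas", "after", "lepas"]

def all_aliases : PySem.Dict String String :=
  pvSITES.items.foldl (fun out sa =>
    sa.2.keys.foldl (fun out al => out.insert (PySem.Str.lower al) sa.1) out)
    PySem.Dict.empty

-- Python truthiness of an Optional[str]: falsy iff None or ""
def pyFalsyOptStr (o : Option String) : Bool :=
  match o with
  | none => true
  | some s => s == ""

def normalize_when (word : Option String) : Option String :=
  if pyFalsyOptStr word then none
  else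
    let w := PySem.Str.lower (word.getD "")
    if BEFORE_WORDS.contains w then some "before"
    else if AFTER_WORDS.contains w then some "after"
    else none

-- the body of A's `for tok in args` loop over the state (site, when)
def pvStepA (aliases : PySem.Dict String String)
    (st : Option String × Option String) (tok : String) :
    Option String × Option String :=
  let low := PySem.Str.lower tok
  if pyFalsyOptStr st.1 && aliases.contains low then
    (aliases.get? low, st.2)   -- site = aliases[low]; continue
  else
    let w := normalize_when (some low)
    if pyFalsyOptStr st.2 && !(pyFalsyOptStr w) then (st.1, w) else st

def parse_cmd_site_when (args : List String) : Option String × Option String :=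
  let aliases := all_aliases
  args.foldl (pvStepA aliases) (none, none)

-- ===== PORT B =====
def ALIAS_TO_SITE : PySem.Dict String String := PySem.Dict.ofList
  [ ("alpha", "ALPHA"), ("a", "ALPHA"),
    ("bravo", "BRAVO"), ("b", "BRAVO"),
    ("charlie", "CHARLIE"), ("c", "CHARLIE"),
    ("delta", "DELTA"), ("d", "DELTA"),
    ("echo", "ECHO"), ("e", "ECHO") ]

def WHEN_OF : PySem.Dict String String := PySem.Dict.ofList
  [ ("sebelum", "before"), ("sblm", "before"), ("sblum", "before"),
    ("sebelom", "before"), ("before", "before"),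
    ("selepas", "after"), ("slps", "after"), ("slpas", "after"),
    ("after", "after"), ("lepas", "after") ]

def parse_cmd_site_when_alt (args : List String) : Option String × Option String :=
  let lows := args.map PySem.Str.lower
  (lows.findSome? (fun w => ALIAS_TO_SITE.get? w),
   lows.findSome? (fun w => WHEN_OF.get? w))

-- ===== PRECONDITION & SPEC =====
def Spec_parse_cmd_site_when (args : List String) (out : Option String × Option String) : Prop := out = parse_cmd_site_when_alt args
instance (args : List String) (out : Option String × Option String) : Decidable (Spec_parse_cmd_site_when args out) := by unfold Spec_parse_cmd_site_when; infer_instance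

-- ===== CLAIM (what is proved, stated in full; the proofs are below) =====
def Claim_equal_parse_cmd_site_when : Prop := ∀ (args : List String), Dom_parse_cmd_site_when args → Spec_parse_cmd_site_when args (parse_cmd_site_when args)

-- ===== LEMMAS AND PROOFS =====

-- lowercasing is idempotent
lemma lowerChar_idem (c : Char) : PySem.Chars.lowerChar (PySem.Chars.lowerChar c) = PySem.Chars.lowerChar c := by
  simp only [PySem.Chars.lowerChar, PySem.Chars.isupper, Bool.and_eq_true, decide_eq_true_eq]
  split_ifs with h1 h2 <;> try rfl
  exfalso
  obtain ⟨ha, hb⟩ := h1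
  obtain ⟨ha2, hb2⟩ := h2
  rw [Char.le_def, UInt32.le_iff_toNat_le] at ha hb ha2 hb2
  simp only [show ('A':Char).val.toNat = 65 from rfl, show ('Z':Char).val.toNat = 90 from rfl] at ha hb ha2 hb2
  have hvalid : (c.toNat + 32).isValidChar := by
    left
    simp only [Char.toNat] at *
    omega
  have hv : (Char.ofNat (c.toNat + 32)).toNat = c.toNat + 32 := by
    rw [Char.toNat_ofNat, if_pos hvalid]
  simp only [Char.toNat] at hv
  simp only [Char.toNat] at *
  omega

lemma lower_idem (s : String) : PySem.Str.lower (PySem.Str.lower s) = PySem.Str.lower s := by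
  simp [PySem.Str.lower, PySem.Chars.lower, List.map_map, Function.comp_def, lowerChar_idem]

-- the alias dict A builds at each call is B's flat table
lemma alias_dict_eq : all_aliases = ALIAS_TO_SITE := by decide

-- an alias lookup never returns "" and an alias word is never a when-word
lemma alias_get_props (s v : String) (h : ALIAS_TO_SITE.get? s = some v) :
    v ≠ "" ∧ WHEN_OF.get? s = none := by
  have hm : (s, v) ∈ ALIAS_TO_SITE.items := PySem.Dict.mem_items_of_get?_eq_some _ h
  rw [show ALIAS_TO_SITE.items =
      [("alpha","ALPHA"),("a","ALPHA"),("bravo","BRAVO"),("b","BRAVO"),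
       ("charlie","CHARLIE"),("c","CHARLIE"),("delta","DELTA"),("d","DELTA"),
       ("echo","ECHO"),("e","ECHO")] from by decide] at hm
  simp only [List.mem_cons, List.not_mem_nil, or_false, Prod.mk.injEq] at hm
  rcases hm with ⟨rfl,rfl⟩|⟨rfl,rfl⟩|⟨rfl,rfl⟩|⟨rfl,rfl⟩|⟨rfl,rfl⟩|⟨rfl,rfl⟩|⟨rfl,rfl⟩|⟨rfl,rfl⟩|⟨rfl,rfl⟩|⟨rfl,rfl⟩ <;>
    exact ⟨by decide, by decide⟩

-- a when-table value is "before" or "after", never ""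
lemma when_get_ne_empty (s u : String) (h : WHEN_OF.get? s = some u) : u ≠ "" := by
  have hm : (s, u) ∈ WHEN_OF.items := PySem.Dict.mem_items_of_get?_eq_some _ h
  rw [show WHEN_OF.items =
      [("sebelum","before"),("sblm","before"),("sblum","before"),("sebelom","before"),
       ("before","before"),("selepas","after"),("slps","after"),("slpas","after"),
       ("after","after"),("lepas","after")] from by decide] at hm
  simp only [List.mem_cons, List.not_mem_nil, or_false, Prod.mk.injEq] at hm
  rcases hm with ⟨rfl,rfl⟩|⟨rfl,rfl⟩|⟨rfl,rfl⟩|⟨rfl,rfl⟩|⟨rfl,rfl⟩|⟨rfl,rfl⟩|⟨rfl,rfl⟩|⟨rfl,rfl⟩|⟨rfl,rfl⟩|⟨rfl,rfl⟩ <;>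
    decide

-- on an already-lowered word, A's normalizer IS B's when-table lookup
lemma normalize_eq_when_get (w : String) (hw : PySem.Str.lower w = w) :
    normalize_when (some w) = WHEN_OF.get? w := by
  by_cases h1 : w = "sebelum";  · subst h1; decide
  by_cases h2 : w = "sblm";     · subst h2; decide
  by_cases h3 : w = "sblum";    · subst h3; decide
  by_cases h4 : w = "sebelom";  · subst h4; decide
  by_cases h5 : w = "before";   · subst h5; decide
  by_cases h6 : w = "selepas";  · subst h6; decide
  by_cases h7 : w = "slps";     · subst h7; decide
  by_cases h8 : w = "slpas";    · subst h8; decide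
  by_cases h9 : w = "after";    · subst h9; decide
  by_cases h10 : w = "lepas";   · subst h10; decide
  -- w is none of the table words: both sides are none
  have hget : WHEN_OF.get? w = none := by
    rw [PySem.Dict.get?_eq_none_iff_not_mem_keys]
    rw [show WHEN_OF.keys =
        ["sebelum","sblm","sblum","sebelom","before",
         "selepas","slps","slpas","after","lepas"] from by decide]
    simp [h1, h2, h3, h4, h5, h6, h7, h8, h9, h10]
  rw [hget]
  by_cases h0 : w = ""
  · subst h0; decide
  · have hfal : pyFalsyOptStr (some w) = false := by simp [pyFalsyOptStr, h0]
    simp only [normalize_when, hfal, Bool.false_eq_true, if_false, Option.getD_some, hw]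
    rw [if_neg, if_neg]
    · simp [AFTER_WORDS, h6, h7, h8, h9, h10]
    · simp [BEFORE_WORDS, h1, h2, h3, h4, h5]

-- loop invariant: A's fold from a "good" state equals B's two scans where the state is still unset
lemma loop_inv (args : List String) (site wh : Option String)
    (hs : site ≠ some "") (hw : wh ≠ some "") :
    args.foldl (pvStepA ALIAS_TO_SITE) (site, wh)
    = ((if site.isSome then site
        else (args.map PySem.Str.lower).findSome? (fun w => ALIAS_TO_SITE.get? w)),
       (if wh.isSome then wh
        else (args.map PySem.Str.lower).findSome? (fun w => WHEN_OF.get? w))) := by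
  induction args generalizing site wh with
  | nil => cases site <;> cases wh <;> simp
  | cons tok rest ih =>
    rw [List.foldl_cons, List.map_cons, List.findSome?_cons, List.findSome?_cons]
    have hnw : normalize_when (some (PySem.Str.lower tok))
        = WHEN_OF.get? (PySem.Str.lower tok) :=
      normalize_eq_when_get _ (lower_idem tok)
    rcases hget : ALIAS_TO_SITE.get? (PySem.Str.lower tok) with _ | v
    · -- tok's lowercase is not an alias: site never set here
      have hcon : ALIAS_TO_SITE.contains (PySem.Str.lower tok) = false := by
        rw [PySem.Dict.contains_eq_isSome_get?, hget]; rfl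
      rcases hwk : WHEN_OF.get? (PySem.Str.lower tok) with _ | u
      · -- and not a when-word either: state unchanged
        have hstep : pvStepA ALIAS_TO_SITE (site, wh) tok = (site, wh) := by
          simp [pvStepA, hcon, hnw, hwk, pyFalsyOptStr]
        rw [hstep, ih site wh hs hw]
      · -- a when-word: set when if unset
        have hu : u ≠ "" := when_get_ne_empty _ _ hwk
        cases wh with
        | none =>
          have hstep : pvStepA ALIAS_TO_SITE (site, none) tok = (site, some u) := by
            simp [pvStepA, hcon, hnw, hwk, pyFalsyOptStr, hu]
          rw [hstep, ih site (some u) hs (by simpa using hu)]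
          simp
        | some t =>
          have hstep : pvStepA ALIAS_TO_SITE (site, some t) tok = (site, some t) := by
            have ht : (t == "") = false := by simpa using fun h => hw (by rw [h])
            simp [pvStepA, hcon, pyFalsyOptStr, ht]
          rw [hstep, ih site (some t) hs hw]
          simp
    · -- tok's lowercase is an alias (so not a when-word): set site if unset
      obtain ⟨hv, hwnone⟩ := alias_get_props _ _ hget
      have hcon : ALIAS_TO_SITE.contains (PySem.Str.lower tok) = true := by
        rw [PySem.Dict.contains_eq_isSome_get?, hget]; rfl
      cases site with
      | none =>
        have hstep : pvStepA ALIAS_TO_SITE (none, wh) tok = (some v, wh) := by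
          simp [pvStepA, hcon, hget, pyFalsyOptStr]
        rw [hstep, ih (some v) wh (by simpa using hv) hw]
        simp [hwnone]
      | some s =>
        have hstep : pvStepA ALIAS_TO_SITE (some s, wh) tok = (some s, wh) := by
          have hsne : (s == "") = false := by simpa using fun h => hs (by rw [h])
          simp [pvStepA, hcon, hnw, hwnone, pyFalsyOptStr, hsne]
        rw [hstep, ih (some s) wh hs hw]
        simp [hwnone]

-- ===== VERDICT (by name: the statement is the Claim_ definition above) =====
theorem parse_cmd_site_when_spec : Claim_equal_parse_cmd_site_when := by
  intro args _
  unfold Spec_parse_cmd_site_when parse_cmd_site_when parse_cmd_site_when_alt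
  rw [alias_dict_eq]
  simpa using loop_inv args none none (by simp) (by simp)
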